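-- pv_equiv track=rewrite | github.com/usvimal/prometheus | tests/test_constitution.py | is_change_not_deletion
-- ===== SOURCE A (Python) =====
-- def is_change_not_deletion(before: list[str], after: list[str]) -> bool:
--     """
--     Test: Is this a legitimate 'change' (augment/clarify) or a deletion?
--     Principle: if removing the new formulation leaves the original principle
--     recognizable, it's a change. If not — it's a deletion.
--     """
--     # Every original principle must still be recognizable in the after state
--     core_directions = [
--         "субъектность",
--         "непрерывность",
--         "самосоздание",
--         "agency",
--         "continuity",
--         "self-creation",
--     ]
--     for direction in core_directions:
--         in_before = any(direction in p.lower() for p in before)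
--         in_after = any(direction in p.lower() for p in after)
--         if in_before and not in_after:
--             return False  # Core direction was removed — this is deletion
--     return True
-- ===== SOURCE B (Python) =====
-- def is_change_not_deletion(before: list[str], after: list[str]) -> bool:
--     core_directions = [
--         "субъектность",
--         "непрерывность",
--         "самосоздание",
--         "agency",
--         "continuity",
--         "self-creation",
--     ]
--
--     def presence_mask(texts: list[str]) -> int:
--         # Single pass over the texts; bit i of the mask records that
--         # core_directions[i] occurs in some text (case-insensitively).
--         m = 0
--         for p in texts:
--             low = p.lower()
--             for i, d in enumerate(core_directions):
--                 if d in low: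
--                     m |= 1 << i
--         return m
--
--     mb = presence_mask(before)
--     return mb & presence_mask(after) == mb
-- ===== Notes on version B (the rewrite author's own statement) =====
-- stated objective: alternative
-- what changed: Inverts the loop nesting: instead of A's per-direction scan over both lists with early return, B makes one pass over each list accumulating a presence bitmask over the six core directions and decides with a single bitwise subset test mb & ma == mb.
import Mathlib
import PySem

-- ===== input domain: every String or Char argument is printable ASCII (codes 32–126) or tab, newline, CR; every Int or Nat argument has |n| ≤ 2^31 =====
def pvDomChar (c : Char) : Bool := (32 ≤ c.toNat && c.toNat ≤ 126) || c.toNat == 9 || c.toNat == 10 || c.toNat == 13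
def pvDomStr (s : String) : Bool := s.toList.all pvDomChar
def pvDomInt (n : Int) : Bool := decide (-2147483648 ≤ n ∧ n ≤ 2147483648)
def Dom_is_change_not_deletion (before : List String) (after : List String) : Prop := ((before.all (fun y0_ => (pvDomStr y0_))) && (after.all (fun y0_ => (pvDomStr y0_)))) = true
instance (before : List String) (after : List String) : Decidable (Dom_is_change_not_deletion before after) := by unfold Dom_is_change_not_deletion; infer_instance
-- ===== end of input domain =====

-- B inverts the loop nesting: one pass over each text list accumulating a presence bitmask
-- over the six core directions, then a single bitwise subset test (alternative decomposition).

-- ===== PORT A =====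
def pvCoreDirections : List String :=
  ["субъектность", "непрерывность", "самосоздание", "agency", "continuity", "self-creation"]

-- A's 'for direction in core_directions: … return False / fall through' loop
def pvLoopA (before : List String) (after : List String) : List String → Bool
  | [] => true
  | direction :: rest =>
    let in_before := before.any (fun p => PySem.Str.isIn direction (PySem.Str.lower p))
    let in_after := after.any (fun p => PySem.Str.isIn direction (PySem.Str.lower p))
    if in_before && !in_after then false else pvLoopA before after rest

def is_change_not_deletion (before : List String) (after : List String) : Bool :=
  pvLoopA before after pvCoreDirections

-- ===== PORT B =====
-- inner 'for i, d in enumerate(core_directions): if d in low: m |= 1 << i'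
-- (the enumerate index is a nonnegative Int; '1 << i' is ported as '1 <<< i.toNat', exact here)
def pvInner (low : String) (m : Nat) : Nat :=
  (PySem.List.enumerate pvCoreDirections).foldl
    (fun m id => if PySem.Str.isIn id.2 low then m ||| (1 <<< id.1.toNat) else m) m

-- 'def presence_mask(texts): m = 0; for p in texts: …; return m'
def pvPresenceMask (ts : List String) : Nat :=
  ts.foldl (fun m p => pvInner (PySem.Str.lower p) m) 0

def is_change_not_deletion_alt (before : List String) (after : List String) : Bool :=
  let mb := pvPresenceMask before
  (mb &&& pvPresenceMask after) == mb

-- ===== PRECONDITION & SPEC =====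
def Spec_is_change_not_deletion (before : List String) (after : List String) (out : Bool) : Prop := out = is_change_not_deletion_alt before after
instance (before : List String) (after : List String) (out : Bool) : Decidable (Spec_is_change_not_deletion before after out) := by unfold Spec_is_change_not_deletion; infer_instance

-- ===== CLAIM (what is proved, stated in full; the proofs are below) =====
def Claim_equal_is_change_not_deletion : Prop := ∀ (before : List String) (after : List String), Dom_is_change_not_deletion before after → Spec_is_change_not_deletion before after (is_change_not_deletion before after)

-- ===== LEMMAS AND PROOFS =====

-- d is present (case-insensitively) in some string of ts
def pvPresent (ts : List String) (d : String) : Bool :=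
  ts.any (fun p => PySem.Str.isIn d (PySem.Str.lower p))

-- the mask encoding of six presence booleans
def pvMaskOf (b0 b1 b2 b3 b4 b5 : Bool) : Nat :=
  (if b0 then 1 else 0) ||| (if b1 then 2 else 0) ||| (if b2 then 4 else 0) |||
  (if b3 then 8 else 0) ||| (if b4 then 16 else 0) ||| (if b5 then 32 else 0)

theorem pvLoopA_eq_all (before after : List String) (ds : List String) :
    pvLoopA before after ds
      = ds.all (fun d => !pvPresent before d || pvPresent after d) := by
  induction ds with
  | nil => rfl
  | cons d rest ih =>
    simp only [pvLoopA, ih, List.all_cons]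
    unfold pvPresent
    cases hb : before.any (fun p => PySem.Str.isIn d (PySem.Str.lower p)) <;>
      cases ha : after.any (fun p => PySem.Str.isIn d (PySem.Str.lower p)) <;>
      simp

theorem pvInner_eq (low : String) (m : Nat) :
    pvInner low m
      = m ||| pvMaskOf (PySem.Str.isIn "субъектность" low) (PySem.Str.isIn "непрерывность" low)
          (PySem.Str.isIn "самосоздание" low) (PySem.Str.isIn "agency" low)
          (PySem.Str.isIn "continuity" low) (PySem.Str.isIn "self-creation" low) := by
  simp only [pvInner, pvCoreDirections, PySem.List.enumerate_cons, PySem.List.enumerate_nil,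
    List.foldl, pvMaskOf]
  norm_num
  split_ifs <;> simp [Nat.or_assoc]

theorem pvMaskOf_or (b0 b1 b2 b3 b4 b5 c0 c1 c2 c3 c4 c5 : Bool) :
    pvMaskOf b0 b1 b2 b3 b4 b5 ||| pvMaskOf c0 c1 c2 c3 c4 c5
      = pvMaskOf (b0 || c0) (b1 || c1) (b2 || c2) (b3 || c3) (b4 || c4) (b5 || c5) := by
  revert b0 b1 b2 b3 b4 b5 c0 c1 c2 c3 c4 c5; decide

theorem pvPresenceMask_foldl (ts : List String) (m : Nat) :
    ts.foldl (fun m p => pvInner (PySem.Str.lower p) m) m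
      = m ||| pvMaskOf (pvPresent ts "субъектность") (pvPresent ts "непрерывность")
          (pvPresent ts "самосоздание") (pvPresent ts "agency")
          (pvPresent ts "continuity") (pvPresent ts "self-creation") := by
  induction ts generalizing m with
  | nil => simp [pvPresent, pvMaskOf]
  | cons p ts ih =>
    rw [List.foldl_cons, ih, pvInner_eq, Nat.or_assoc, pvMaskOf_or]
    simp [pvPresent]

theorem pvPresenceMask_eq (ts : List String) :
    pvPresenceMask ts
      = pvMaskOf (pvPresent ts "субъектность") (pvPresent ts "непрерывность")
          (pvPresent ts "самосоздание") (pvPresent ts "agency")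
          (pvPresent ts "continuity") (pvPresent ts "self-creation") := by
  simpa [Nat.zero_or] using pvPresenceMask_foldl ts 0

theorem pvMask_subset (b0 b1 b2 b3 b4 b5 c0 c1 c2 c3 c4 c5 : Bool) :
    ((pvMaskOf b0 b1 b2 b3 b4 b5 &&& pvMaskOf c0 c1 c2 c3 c4 c5)
        == pvMaskOf b0 b1 b2 b3 b4 b5)
      = ((!b0 || c0) && ((!b1 || c1) && ((!b2 || c2) && ((!b3 || c3) &&
          ((!b4 || c4) && ((!b5 || c5) && true)))))) := by
  revert b0 b1 b2 b3 b4 b5 c0 c1 c2 c3 c4 c5; decide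

-- ===== VERDICT (by name: the statement is the Claim_ definition above) =====
theorem is_change_not_deletion_spec : Claim_equal_is_change_not_deletion := by
  intro before after _
  unfold Spec_is_change_not_deletion is_change_not_deletion is_change_not_deletion_alt
  rw [pvLoopA_eq_all, pvPresenceMask_eq before, pvPresenceMask_eq after, pvMask_subset]
  simp only [pvCoreDirections, List.all_cons, List.all_nil]
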